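-- pv_equiv track=rewrite | github.com/Muditsingal044/Codetantra | Competitive Coding - 1/2. Problems of Strings/2.py | isPrimeLengthPalidroms
-- ===== SOURCE A (Python) =====
-- def isPrimeLengthPalidroms(s):
--   f = 0
--   a = len(s)
--   for i in range(2,a):
--     if a%i==0:
--       f=1
--       break
--   if s==s[::-1] and f==0:
--     return True
--   else:
--     return False
-- ===== SOURCE B (Python) =====
-- def isPrimeLengthPalidroms(s):
--     if s != s[::-1]:
--         return False
--     a = len(s)
--     i = 2
--     while i * i <= a:
--         if a % i == 0:
--             return False
--         i += 1
--     return True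
-- ===== Notes on version B (the rewrite author's own statement) =====
-- stated objective: faster
-- what changed: Trial division only up to sqrt(len(s)) with early returns, instead of scanning all candidate divisors 2..len(s)-1 with a flag; lengths 0..3 still count as prime exactly as in A.
import Mathlib
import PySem

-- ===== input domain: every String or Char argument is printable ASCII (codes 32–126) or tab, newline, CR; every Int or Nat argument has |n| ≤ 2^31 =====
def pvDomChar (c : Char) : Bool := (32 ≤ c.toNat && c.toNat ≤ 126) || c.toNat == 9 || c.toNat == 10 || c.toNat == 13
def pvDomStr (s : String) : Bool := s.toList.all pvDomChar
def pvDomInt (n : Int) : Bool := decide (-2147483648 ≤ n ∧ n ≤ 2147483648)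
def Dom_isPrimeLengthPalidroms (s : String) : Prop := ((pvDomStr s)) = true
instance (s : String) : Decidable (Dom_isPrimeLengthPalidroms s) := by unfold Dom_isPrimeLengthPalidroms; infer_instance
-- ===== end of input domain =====

-- B replaces A's divisor scan over all of range(2, len(s)) by trial division up to
-- sqrt(len(s)) with early returns (objective: faster divisor scan).

-- ===== PORT A =====
-- for i in range(2,a): if a%i==0: f=1; break   (returns the final flag f)
def pvLoopA (a : Int) : List Int → Int → Int
  | [], f => f
  | i :: rest, f => if PySem.Int.mod a i == 0 then 1 else pvLoopA a rest f

def isPrimeLengthPalidroms (s : String) : Bool :=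
  let f : Int := 0
  let a : Int := PySem.Str.len s
  let f := pvLoopA a (PySem.List.pyRange 2 a 1) f
  if (PySem.Str.slice? s none none (-1) == some s) && f == 0 then true else false

-- ===== PORT B =====
-- needed by pvLoopB's decreasing_by: i ≤ i*i over ℤ
theorem pv_le_mul_self (i : Int) : i ≤ i * i := by nlinarith [sq_nonneg i, sq_nonneg (i - 1)]

-- i = 2; while i*i <= a: if a%i==0: return False; i += 1; return True
def pvLoopB (a i : Int) : Bool :=
  if _h : i * i ≤ a then
    if PySem.Int.mod a i == 0 then false else pvLoopB a (i + 1)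
  else true
termination_by (a + 1 - i).toNat
decreasing_by
  have hia : i ≤ a := le_trans (pv_le_mul_self i) _h
  omega

def isPrimeLengthPalidroms_alt (s : String) : Bool :=
  if PySem.Str.slice? s none none (-1) != some s then false
  else pvLoopB (PySem.Str.len s) 2

-- ===== PRECONDITION & SPEC =====
def Spec_isPrimeLengthPalidroms (s : String) (out : Bool) : Prop := out = isPrimeLengthPalidroms_alt s
instance (s : String) (out : Bool) : Decidable (Spec_isPrimeLengthPalidroms s out) := by unfold Spec_isPrimeLengthPalidroms; infer_instance

-- ===== CLAIM (what is proved, stated in full; the proofs are below) =====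
def Claim_equal_isPrimeLengthPalidroms : Prop := ∀ (s : String), Dom_isPrimeLengthPalidroms s → Spec_isPrimeLengthPalidroms s (isPrimeLengthPalidroms s)

-- ===== LEMMAS AND PROOFS =====

-- A's flag loop: final flag is 0 iff no listed candidate divides a
theorem pvLoopA_eq_zero_iff (a : Int) (l : List Int) :
    pvLoopA a l 0 = 0 ↔ ∀ i ∈ l, ¬ i ∣ a := by
  induction l with
  | nil => simp [pvLoopA]
  | cons i rest ih =>
    by_cases h : i ∣ a
    · have hm : PySem.Int.mod a i = 0 := (PySem.Int.mod_eq_zero_iff_dvd a i).mpr h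
      simp [pvLoopA, hm, h]
    · have hm : ¬ (PySem.Int.mod a i = 0) := fun hc => h ((PySem.Int.mod_eq_zero_iff_dvd a i).mp hc)
      simp [pvLoopA, hm, ih, h]

-- B's loop: true iff no j ≥ i with j*j ≤ a divides a (for 1 ≤ i)
theorem pvLoopB_iff (a : Int) : ∀ i, 1 ≤ i →
    (pvLoopB a i = true ↔ ∀ j, i ≤ j → j * j ≤ a → ¬ j ∣ a) := by
  intro i
  induction i using pvLoopB.induct a with
  | case1 i hle hmod =>
    intro _
    have hd : i ∣ a := (PySem.Int.mod_eq_zero_iff_dvd a i).mp (by simpa using hmod)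
    rw [pvLoopB]
    simp only [hle, dite_eq_ite, if_pos, hmod]
    constructor
    · intro h; simp at h
    · intro h; exact absurd hd (h i le_rfl hle)
  | case2 i hle hmod ih =>
    intro hi
    have hnd : ¬ i ∣ a := fun hc => by
      simp [(PySem.Int.mod_eq_zero_iff_dvd a i).mpr hc] at hmod
    rw [pvLoopB]
    simp only [hle, dite_eq_ite, if_pos, hmod, Bool.false_eq_true, if_false]
    rw [ih (by omega)]
    constructor
    · intro h j hij hjj
      rcases eq_or_lt_of_le hij with rfl | hlt
      · exact hnd
      · exact h j (by omega) hjj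
    · intro h j hij hjj
      exact h j (by omega) hjj
  | case3 i hle =>
    intro hi
    rw [pvLoopB]
    simp only [hle, dite_eq_ite, if_neg, not_false_iff]
    constructor
    · intro _ j hij hjj hd
      have h1 : i * i ≤ j * j := by nlinarith
      omega
    · intro _; trivial

-- the arithmetic heart: a has a divisor in [2, a) iff it has one with square ≤ a
theorem pv_divisor_sqrt (a : Int) (ha : 0 ≤ a) :
    (∃ i, 2 ≤ i ∧ i < a ∧ i ∣ a) ↔ (∃ j, 2 ≤ j ∧ j * j ≤ a ∧ j ∣ a) := by
  constructor
  · rintro ⟨i, h2, hlt, e, he⟩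
    by_cases hsq : i * i ≤ a
    · exact ⟨i, h2, hsq, e, he⟩
    · have hi0 : (0:Int) < i := by omega
      have he0 : 0 < e := by nlinarith
      have he1 : 1 < e := by nlinarith
      have hei : e < i := by nlinarith
      have hee : e * e ≤ a := by nlinarith
      exact ⟨e, by omega, hee, i, by rw [he]; ring⟩
  · rintro ⟨j, h2, hsq, hd⟩
    have hja : j < a := by nlinarith
    exact ⟨j, h2, hja, hd⟩

-- the two divisor scans agree on every nonnegative a
theorem pv_scan_agree (a : Int) (ha0 : 0 ≤ a) :
    (pvLoopA a (PySem.List.pyRange 2 a 1) 0 = 0) ↔ (pvLoopB a 2 = true) := by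
  rw [pvLoopA_eq_zero_iff, pvLoopB_iff a 2 (by norm_num)]
  constructor
  · intro h j h2 hjj hd
    obtain ⟨i, hi2, hia, hid⟩ := (pv_divisor_sqrt a ha0).mpr ⟨j, h2, hjj, hd⟩
    exact h i ((PySem.List.mem_pyRange_one).mpr ⟨hi2, hia⟩) hid
  · intro h i hi hid
    rw [PySem.List.mem_pyRange_one] at hi
    obtain ⟨j, hj2, hjj, hjd⟩ := (pv_divisor_sqrt a ha0).mp ⟨i, hi.1, hi.2, hid⟩
    exact h j hj2 hjj hjd

-- ===== VERDICT (by name: the statement is the Claim_ definition above) =====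
theorem isPrimeLengthPalidroms_spec : Claim_equal_isPrimeLengthPalidroms := by
  intro s _
  unfold Spec_isPrimeLengthPalidroms isPrimeLengthPalidroms isPrimeLengthPalidroms_alt
  have ha0 : 0 ≤ PySem.Str.len s := by simp [PySem.Str.len_eq]
  by_cases hp : PySem.Str.slice? s none none (-1) = some s
  · have key := pv_scan_agree (PySem.Str.len s) ha0
    simp only [PySem.Str.len_eq, String.length_toList] at key
    cases hb : pvLoopB ((s.length : Int)) 2 with
    | true => simp [hp, bne, key.mpr hb]; exact hb
    | false =>
      have : ¬ (pvLoopA ((s.length : Int)) (PySem.List.pyRange 2 ((s.length : Int)) 1) 0 = 0) := by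
        intro hc; rw [key] at hc; simp [hc] at hb
      simp [hp, bne, this]; exact hb
  · simp [hp, bne]
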